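-- pv_equiv track=rewrite | github.com/981377660LMT/algorithm-study | 15_双指针/经典题/最接近目标的两个元素之和.py | solve
-- ===== SOURCE A (Python) =====
-- from typing import List
--
-- def solve(nums: List[int], target: int) -> int:
--     n = len(nums)
--     nums.sort()
--
--     res = int(1e20)
--     i, j = 0, n - 1
--     while i < j:
--         if nums[i] + nums[j] > target:
--             res = min(res, nums[i] + nums[j])
--             j -= 1
--         else:
--             i += 1
--
--     return res
-- ===== SOURCE B (Python) =====
-- from typing import List
--
-- def solve(nums: List[int], target: int) -> int:
--     # Sort, then for each position i binary-search (bisect_right style, hand-rolled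
--     # since only 'typing' may be imported) the suffix nums[i+1:] for the first value
--     # strictly greater than target - nums[i]; that gives the smallest qualifying sum
--     # with partner index > i.  (nums is sorted in place, matching A's mutation.)
--     nums.sort()
--     n = len(nums)
--     res = int(1e20)
--     for i in range(n):
--         need = target - nums[i]
--         lo, hi = i + 1, n
--         while lo < hi:
--             mid = (lo + hi) // 2
--             if nums[mid] <= need:
--                 lo = mid + 1
--             else:
--                 hi = mid
--         if lo < n:
--             s = nums[i] + nums[lo]
--             if s < res:
--                 res = s
--     return res
-- ===== Notes on version B (the rewrite author's own statement) =====
-- stated objective: alternative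
-- what changed: Replaces the coordinated two-pointer sweep over the sorted array by an independent per-element binary search (bisect_right style) for the first partner making the sum exceed target.
import Mathlib
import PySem

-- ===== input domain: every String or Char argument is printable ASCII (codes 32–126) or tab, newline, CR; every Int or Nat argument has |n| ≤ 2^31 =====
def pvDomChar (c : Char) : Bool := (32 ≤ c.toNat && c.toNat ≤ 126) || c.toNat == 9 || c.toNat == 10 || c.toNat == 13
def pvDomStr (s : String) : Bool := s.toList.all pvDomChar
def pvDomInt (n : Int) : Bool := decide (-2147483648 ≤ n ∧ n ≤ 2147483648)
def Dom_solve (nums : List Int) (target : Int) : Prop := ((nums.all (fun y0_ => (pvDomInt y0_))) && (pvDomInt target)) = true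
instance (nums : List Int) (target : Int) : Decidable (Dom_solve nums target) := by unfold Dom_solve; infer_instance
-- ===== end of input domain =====

-- B replaces A's coordinated two-pointer sweep by an independent per-element binary
-- search for the first partner making the sum exceed target (alternative decomposition,
-- same return value; both sort nums, A does so in place — the equivalence proved here
-- is about the return value).

-- ===== PORT A =====
-- while i < j loop of A; the loop keeps 0 ≤ i < j ≤ n-1, so both indices are always
-- in range and plain getD is exact for nums[i] / nums[j].
-- fuel = j - i, the loop measure: a totality guard only (each iteration shrinks
-- j - i by exactly 1, so the 0-fuel branch is reached exactly when the loop exits)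
def solveLoopA (l : List Int) (target : Int) : Nat → Nat → Nat → Int → Int
  | 0, _, _, res => res
  | fuel + 1, i, j, res =>
    if i < j then
      if l.getD i 0 + l.getD j 0 > target then
        solveLoopA l target fuel i (j - 1) (min res (l.getD i 0 + l.getD j 0))
      else
        solveLoopA l target fuel (i + 1) j res
    else res

def solve (nums : List Int) (target : Int) : Int :=
  let n := nums.length
  let l := PySem.List.sorted nums (fun x => x) false   -- nums.sort()
  -- int(1e20) = 100000000000000000000 exactly; initial fuel = (n-1) - 0
  solveLoopA l target (n - 1) 0 (n - 1) 100000000000000000000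

-- ===== PORT B =====
-- B's inner 'while lo < hi' binary search; 0 ≤ lo < hi ≤ n throughout, so mid is
-- always in range and plain getD is exact for nums[mid]; (lo+hi)//2 on the
-- nonnegative loop variables is Nat division.
-- fuel = hi - lo bounds the iteration count (each step strictly shrinks hi - lo):
-- a totality guard only
def bsGoB (l : List Int) (need : Int) : Nat → Nat → Nat → Nat
  | 0, lo, _ => lo
  | fuel + 1, lo, hi =>
    if lo < hi then
      if l.getD ((lo + hi) / 2) 0 ≤ need then
        bsGoB l need fuel ((lo + hi) / 2 + 1) hi
      else
        bsGoB l need fuel lo ((lo + hi) / 2)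
    else lo

def bsLoopB (l : List Int) (need : Int) (lo hi : Nat) : Nat :=
  bsGoB l need (hi - lo) lo hi

-- B's outer 'for i in range(n)' loop; 0 ≤ i < n keeps nums[i] (and nums[lo] when
-- lo < n) in range, so plain getD is exact.
-- fuel = n - i, the remaining range(n) iterations: a totality guard only
def solveOuterB (l : List Int) (target : Int) (n : Nat) : Nat → Nat → Int → Int
  | 0, _, res => res
  | fuel + 1, i, res =>
    if i < n then
      let lo := bsLoopB l (target - l.getD i 0) (i + 1) n
      solveOuterB l target n fuel (i + 1)
        (if lo < n then
          (if l.getD i 0 + l.getD lo 0 < res then l.getD i 0 + l.getD lo 0 else res)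
         else res)
    else res

def solve_alt (nums : List Int) (target : Int) : Int :=
  let l := PySem.List.sorted nums (fun x => x) false   -- nums.sort()
  let n := nums.length
  solveOuterB l target n n 0 100000000000000000000    -- int(1e20); fuel = n - 0

-- ===== PRECONDITION & SPEC =====
def Spec_solve (nums : List Int) (target : Int) (out : Int) : Prop := out = solve_alt nums target
instance (nums : List Int) (target : Int) (out : Int) : Decidable (Spec_solve nums target out) := by unfold Spec_solve; infer_instance

-- ===== CLAIM (what is proved, stated in full; the proofs are below) =====
def Claim_equal_solve : Prop := ∀ (nums : List Int) (target : Int), Dom_solve nums target → Spec_solve nums target (solve nums target)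

-- ===== LEMMAS AND PROOFS =====

-- Reference pair scan: both ports are proved equal to this fold over all pairs
-- (head + each later element) of the sorted list.
def pairInner (target x : Int) (res : Int) (rest : List Int) : Int :=
  rest.foldl (fun r y => if target < x + y ∧ x + y < r then x + y else r) res

def pairScan (target : Int) : List Int → Int → Int
  | [], res => res
  | x :: rest, res => pairScan target rest (pairInner target x res rest)

theorem inner_min (target x s : Int) (t : List Int) :
    ∀ r : Int, pairInner target x (min r s) t = min (pairInner target x r t) s := by
  induction t with
  | nil => intro r; rfl
  | cons y t ih =>
    intro r
    simp only [pairInner, List.foldl_cons] at *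
    rw [show (if target < x + y ∧ x + y < min r s then x + y else min r s)
          = min (if target < x + y ∧ x + y < r then x + y else r) s from by
        split_ifs <;> omega]
    exact ih _

theorem inner_mono (target x : Int) (t : List Int) :
    ∀ r : Int, pairInner target x r t ≤ r := by
  induction t with
  | nil => intro r; exact le_refl _
  | cons y t ih =>
    intro r
    simp only [pairInner, List.foldl_cons]
    refine le_trans (ih _) ?_
    split_ifs <;> omega

theorem inner_skip (target x : Int) (t : List Int) (h : ∀ y ∈ t, x + y ≤ target) :
    ∀ r : Int, pairInner target x r t = r := by
  induction t with
  | nil => intro r; rfl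
  | cons y t ih =>
    intro r
    have hy : x + y ≤ target := h y (List.mem_cons_self ..)
    simp only [pairInner, List.foldl_cons]
    rw [show (if target < x + y ∧ x + y < r then x + y else r) = r from by split_ifs <;> omega]
    exact ih (fun y hy => h y (List.mem_cons_of_mem _ hy)) r

theorem inner_ge (target x : Int) (t : List Int) :
    ∀ r : Int, (∀ y ∈ t, r ≤ x + y) → pairInner target x r t = r := by
  induction t with
  | nil => intro r _; rfl
  | cons y t ih =>
    intro r h
    have hy : r ≤ x + y := h y (List.mem_cons_self ..)
    simp only [pairInner, List.foldl_cons]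
    rw [show (if target < x + y ∧ x + y < r then x + y else r) = r from by split_ifs <;> omega]
    exact ih r (fun y hy => h y (List.mem_cons_of_mem _ hy))

theorem inner_append_single (target x r z : Int) (t : List Int) :
    pairInner target x r (t ++ [z])
      = (if target < x + z ∧ x + z < pairInner target x r t then x + z
         else pairInner target x r t) := by
  simp [pairInner, List.foldl_append]

-- the first qualifying partner of x decides x's whole contribution
theorem inner_found (target x res y : Int) (t : List Int)
    (hy : target < x + y) (hm : ∀ y' ∈ t, y ≤ y') :
    pairInner target x res (y :: t) = min res (x + y) := by
  simp only [pairInner, List.foldl_cons]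
  rw [show (if target < x + y ∧ x + y < res then x + y else res) = min res (x + y) from by
    split_ifs <;> omega]
  exact inner_ge target x t _ (fun y' hy' => by have := hm y' hy'; omega)

-- adding a final element z whose sums cannot beat the running minimum changes nothing
theorem pairScan_append_single (target z : Int) (ys : List Int) :
    ∀ r : Int, (∀ y ∈ ys, r ≤ y + z) → pairScan target (ys ++ [z]) r = pairScan target ys r := by
  induction ys with
  | nil => intro r _; rfl
  | cons y ys ih =>
    intro r h
    have hy : r ≤ y + z := h y (List.mem_cons_self ..)
    have hmono := inner_mono target y ys r
    simp only [List.cons_append, pairScan]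
    rw [inner_append_single]
    rw [show (if target < y + z ∧ y + z < pairInner target y r ys then y + z
              else pairInner target y r ys) = pairInner target y r ys from by
      split_ifs <;> omega]
    exact ih _ (fun y' hy' => le_trans (le_trans hmono (h y' (List.mem_cons_of_mem _ hy')))
      (le_refl _))

theorem pairScan_dropLast (target x z res : Int) (t : List Int)
    (hp : (x :: (t ++ [z])).Pairwise (· ≤ ·)) (hs : target < x + z) :
    pairScan target (x :: (t ++ [z])) res = pairScan target (x :: t) (min res (x + z)) := by
  have hx : ∀ y ∈ t, x ≤ y := by
    intro y hy
    exact (List.pairwise_cons.1 hp).1 y (List.mem_append_left _ hy)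
  simp only [pairScan]
  rw [inner_append_single]
  have hmono := inner_mono target x t res
  rw [show (if target < x + z ∧ x + z < pairInner target x res t then x + z
            else pairInner target x res t) = min (pairInner target x res t) (x + z) from by
    split_ifs <;> omega]
  rw [pairScan_append_single target z t _ (fun y hy => by have := hx y hy; omega)]
  rw [inner_min]

theorem le_last_of_pairwise (z : Int) (t : List Int) (hp : (t ++ [z]).Pairwise (· ≤ ·)) :
    ∀ y ∈ t, y ≤ z := by
  intro y hy
  exact (List.pairwise_append.1 hp).2.2 y hy z (List.mem_singleton.2 rfl)

-- the two-pointer sweep on the window l[i..j] equals the pair scan on that window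
theorem bridge (l : List Int) (target : Int) (hl : l.Pairwise (· ≤ ·)) :
    ∀ (k i j : Nat) (res : Int), j - i = k → i ≤ j → j < l.length →
      solveLoopA l target k i j res = pairScan target ((l.drop i).take (j + 1 - i)) res := by
  intro k
  induction k with
  | zero =>
    intro i j res hk hij hj
    have hij' : i = j := by omega
    subst hij'
    have hi : i < l.length := hj
    rw [List.drop_eq_getElem_cons hi]
    rw [show i + 1 - i = 1 from by omega]
    rfl
  | succ k ih =>
    intro i j res hk hij hj
    have hilt : i < j := by omega
    have hi : i < l.length := by omega
    have hi1 : i + 1 ≤ j := hilt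
    have hgi : l.getD i 0 = l[i] := List.getD_eq_getElem l 0 hi
    have hgj : l.getD j 0 = l[j] := List.getD_eq_getElem l 0 hj
    have hwin : (l.drop i).take (j + 1 - i)
        = l[i] :: (((l.drop (i + 1)).take (j - 1 - i)) ++ [l[j]]) := by
      rw [List.drop_eq_getElem_cons hi]
      rw [show j + 1 - i = (j - i - 1) + 1 + 1 from by omega]
      rw [List.take_succ_cons, List.take_add_one]
      have hopt : (l.drop (i + 1))[j - i - 1]? = some l[j] := by
        rw [List.getElem?_drop, show i + 1 + (j - i - 1) = j from by omega]
        exact List.getElem?_eq_getElem hj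
      rw [hopt, show j - i - 1 = j - 1 - i from by omega]
      rfl
    have hsub : ((l.drop i).take (j + 1 - i)).Sublist l :=
      (List.take_sublist _ _).trans (List.drop_sublist _ _)
    have hpw : ((l.drop i).take (j + 1 - i)).Pairwise (· ≤ ·) := hl.sublist hsub
    simp only [solveLoopA, hilt, if_true, hgi, hgj]
    by_cases hbig : l[i] + l[j] > target
    · simp only [hbig, if_true]
      rw [ih i (j - 1) _ (by omega) (by omega) (by omega)]
      rw [hwin]
      rw [pairScan_dropLast target l[i] l[j] res _ (hwin ▸ hpw) (by omega)]
      congr 1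
      rw [List.drop_eq_getElem_cons hi]
      rw [show j - 1 + 1 - i = (j - 1 - i) + 1 from by omega]
      rfl
    · simp only [hbig, if_false]
      rw [ih (i + 1) j _ (by omega) (by omega) hj]
      rw [hwin]
      have htail : (l.drop (i + 1)).take (j + 1 - (i + 1))
          = ((l.drop (i + 1)).take (j - 1 - i)) ++ [l[j]] := by
        rw [show j + 1 - (i + 1) = (j - 1 - i) + 1 from by omega]
        rw [List.take_add_one]
        have hopt : (l.drop (i + 1))[j - 1 - i]? = some l[j] := by
          rw [List.getElem?_drop, show i + 1 + (j - 1 - i) = j from by omega]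
          exact List.getElem?_eq_getElem hj
        rw [hopt]
        rfl
      rw [htail]
      rw [show pairScan target (l[i] :: (((l.drop (i + 1)).take (j - 1 - i)) ++ [l[j]])) res
            = pairScan target (((l.drop (i + 1)).take (j - 1 - i)) ++ [l[j]]) res from ?_]
      have hpw' := hwin ▸ hpw
      have hle : ∀ y ∈ ((l.drop (i + 1)).take (j - 1 - i)) ++ [l[j]], l[i] + y ≤ target := by
        intro y hy
        rcases List.mem_append.1 hy with hy | hy
        · have hyz : y ≤ l[j] :=
            le_last_of_pairwise l[j] _ ((List.pairwise_cons.1 hpw').2) y hy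
          omega
        · rw [List.mem_singleton.1 hy]; omega
      simp only [pairScan]
      rw [inner_skip target l[i] _ hle res]

-- sortedness, index form
theorem getElem_mono_of_pairwise (l : List Int) (hl : l.Pairwise (· ≤ ·))
    (p q : Nat) (hq : q < l.length) (hpq : p ≤ q) : l[p]'(by omega) ≤ l[q] := by
  rcases Nat.lt_or_ge p q with h | h
  · exact List.pairwise_iff_getElem.1 hl p q (by omega) hq h
  · have : p = q := by omega
    subst this; exact le_refl _

-- B's binary search returns the first index in [lo, hi) whose value exceeds need
theorem bsGoB_spec (l : List Int) (need : Int) (hl : l.Pairwise (· ≤ ·)) :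
    ∀ (k lo hi : Nat), hi - lo ≤ k → lo ≤ hi → hi ≤ l.length →
      lo ≤ bsGoB l need k lo hi ∧ bsGoB l need k lo hi ≤ hi ∧
      (∀ m (hm : m < l.length), lo ≤ m → m < bsGoB l need k lo hi → l[m] ≤ need) ∧
      (∀ m (hm : m < l.length), bsGoB l need k lo hi ≤ m → m < hi → need < l[m]) := by
  intro k
  induction k with
  | zero =>
    intro lo hi hk hlohi hhi
    have : lo = hi := by omega
    subst this
    simp only [bsGoB]
    exact ⟨le_refl _, le_refl _, fun m hm h1 h2 => by omega, fun m hm h1 h2 => by omega⟩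
  | succ k ih =>
    intro lo hi hk hlohi hhi
    by_cases hlt : lo < hi
    case neg =>
      have : lo = hi := by omega
      subst this
      simp only [bsGoB, Nat.lt_irrefl, if_false]
      exact ⟨le_refl _, le_refl _, fun m hm h1 h2 => by omega, fun m hm h1 h2 => by omega⟩
    have hmid1 : lo ≤ (lo + hi) / 2 := by omega
    have hmid2 : (lo + hi) / 2 < hi := by omega
    have hmidlen : (lo + hi) / 2 < l.length := by omega
    have hgd : l.getD ((lo + hi) / 2) 0 = l[(lo + hi) / 2] := List.getD_eq_getElem l 0 hmidlen
    simp only [bsGoB, hlt, if_true, hgd]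
    by_cases hc : l[(lo + hi) / 2] ≤ need
    · simp only [hc, if_true]
      obtain ⟨h1, h2, h3, h4⟩ := ih ((lo + hi) / 2 + 1) hi (by omega) (by omega) hhi
      refine ⟨by omega, h2, ?_, h4⟩
      intro m hm hmlo hmlt
      rcases Nat.lt_or_ge m ((lo + hi) / 2 + 1) with h | h
      · exact le_trans (getElem_mono_of_pairwise l hl m ((lo + hi) / 2) hmidlen (by omega)) hc
      · exact h3 m hm h hmlt
    · simp only [hc, if_false]
      obtain ⟨h1, h2, h3, h4⟩ := ih lo ((lo + hi) / 2) (by omega) (by omega) (by omega)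
      refine ⟨h1, by omega, h3, ?_⟩
      intro m hm hmge hmlt
      rcases Nat.lt_or_ge m ((lo + hi) / 2) with h | h
      · exact h4 m hm hmge h
      · exact lt_of_lt_of_le (by omega) (getElem_mono_of_pairwise l hl ((lo + hi) / 2) m hm h)

-- B's outer loop from index i equals the pair scan of the suffix from i
theorem outerB_eq (l : List Int) (target : Int) (hl : l.Pairwise (· ≤ ·)) :
    ∀ (k i : Nat) (res : Int), l.length - i = k →
      solveOuterB l target l.length k i res = pairScan target (l.drop i) res := by
  intro k
  induction k with
  | zero =>
    intro i res hk
    rw [List.drop_eq_nil_of_le (by omega)]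
    rfl
  | succ k ih =>
    intro i res hk
    have hi : i < l.length := by omega
    have hgi : l.getD i 0 = l[i] := List.getD_eq_getElem l 0 hi
    simp only [solveOuterB, hi, if_true, hgi]
    rw [ih (i + 1) _ (by omega)]
    rw [List.drop_eq_getElem_cons hi]
    simp only [pairScan]
    congr 1
    -- remains: the bisect-based update equals pairInner on the suffix after i
    obtain ⟨hlo1, hlo2, hbelow, habove⟩ :=
      bsGoB_spec l (target - l[i]) hl (l.length - (i + 1)) (i + 1) l.length (le_refl _)
        (by omega) (le_refl _)
    simp only [bsLoopB]
    set lo := bsGoB l (target - l[i]) (l.length - (i + 1)) (i + 1) l.length with hlodef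
    by_cases hfound : lo < l.length
    · have hglo : l.getD lo 0 = l[lo] := List.getD_eq_getElem l 0 hfound
      simp only [hfound, if_true, hglo]
      -- split the suffix at lo: elements before lo never qualify, l[lo] qualifies first
      have hsplit : l.drop (i + 1)
          = ((l.drop (i + 1)).take (lo - (i + 1))) ++ (l[lo] :: l.drop (lo + 1)) := by
        conv_lhs => rw [← List.take_append_drop (lo - (i + 1)) (l.drop (i + 1))]
        congr 1
        rw [List.drop_drop, show i + 1 + (lo - (i + 1)) = lo from by omega]
        exact List.drop_eq_getElem_cons hfound
      rw [hsplit]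
      rw [show pairInner target l[i] res
            (((l.drop (i + 1)).take (lo - (i + 1))) ++ (l[lo] :: l.drop (lo + 1)))
          = pairInner target l[i]
            (pairInner target l[i] res ((l.drop (i + 1)).take (lo - (i + 1))))
            (l[lo] :: l.drop (lo + 1)) from by simp [pairInner, List.foldl_append]]
      rw [inner_skip target l[i] _ ?_ res]
      · rw [inner_found target l[i] res l[lo] _ (by
            have := habove lo hfound (le_refl _) hfound; omega) ?_]
        · rw [show min res (l[i] + l[lo])
                = (if l[i] + l[lo] < res then l[i] + l[lo] else res) from by
            split_ifs <;> omega]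
        · intro y' hy'
          obtain ⟨m, hm, rfl⟩ := List.mem_iff_getElem.1 hy'
          have hidx : lo + 1 + m < l.length := by rw [List.length_drop] at hm; omega
          have : (l.drop (lo + 1))[m] = l[lo + 1 + m]'hidx := List.getElem_drop ..
          rw [this]
          exact getElem_mono_of_pairwise l hl lo (lo + 1 + m) hidx (by omega)
      · -- elements strictly before lo have value ≤ target - l[i]
        intro y hy
        obtain ⟨m, hm, rfl⟩ := List.mem_iff_getElem.1 hy
        have hmlen : m < lo - (i + 1) := by
          have := hm
          simp only [List.length_take, List.length_drop] at this
          omega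
        have hidx : i + 1 + m < l.length := by omega
        have : ((l.drop (i + 1)).take (lo - (i + 1)))[m] = l[i + 1 + m]'hidx := by
          rw [List.getElem_take, List.getElem_drop]
        rw [this]
        have := hbelow (i + 1 + m) hidx (by omega) (by omega)
        omega
    · -- lo = n: no index after i qualifies, the whole suffix is skipped
      simp only [hfound, if_false]
      rw [inner_skip target l[i] _ ?_ res]
      intro y hy
      obtain ⟨m, hm, rfl⟩ := List.mem_iff_getElem.1 hy
      have hidx : i + 1 + m < l.length := by rw [List.length_drop] at hm; omega
      have : (l.drop (i + 1))[m] = l[i + 1 + m]'hidx := List.getElem_drop ..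
      rw [this]
      have := hbelow (i + 1 + m) hidx (by omega) (by omega)
      omega

-- ===== VERDICT (by name: the statement is the Claim_ definition above) =====
theorem solve_spec : Claim_equal_solve := by
  intro nums target _
  unfold Spec_solve solve solve_alt
  set l := PySem.List.sorted nums (fun x => x) false with hldef
  have hlen : l.length = nums.length := (PySem.List.sorted_perm nums (fun x => x) false).length_eq
  have hpw : l.Pairwise (· ≤ ·) := by
    have := PySem.List.sorted_pairwise nums (fun x => x)
    simpa using this
  rw [show nums.length = l.length from hlen.symm]
  rw [outerB_eq l target hpw l.length 0 100000000000000000000 (by omega)]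
  rw [List.drop_zero]
  rcases Nat.eq_zero_or_pos l.length with h0 | hpos
  · have hlnil : l = [] := List.length_eq_zero_iff.1 h0
    rw [h0, hlnil]
    rw [solveLoopA]
    simp [pairScan]
  · have hj : l.length - 1 < l.length := by omega
    rw [bridge l target hpw (l.length - 1) 0 (l.length - 1)
      100000000000000000000 rfl (Nat.zero_le _) hj]
    congr 1
    rw [List.drop_zero]
    have hle : l.length ≤ l.length - 1 + 1 - 0 := by omega
    exact List.take_of_length_le hle
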